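-- pv_equiv track=rewrite | github.com/Irene211/112-Homework | hw5.py | checkNN
-- ===== SOURCE A (Python) =====
-- def checkNN(board):
--     n = len(board)
--     lst = []
--     for row in board:
--         lst += row
--     lst.sort()
--     nnLst = list(range(1, n ** 2 + 1))
--     return nnLst == lst
-- ===== SOURCE B (Python) =====
-- def checkNN(board):
--     n = len(board)
--     flat = [x for row in board for x in row]
--     if len(flat) != n * n:
--         return False
--     return set(flat) == set(range(1, n * n + 1))
-- ===== Notes on version B (the rewrite author's own statement) =====
-- stated objective: simpler
-- what changed: Replaces A's sort-and-compare-to-range with a single flattening pass plus a length guard and a set-equality test against set(range(1, n*n+1)), removing the sort.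
import Mathlib
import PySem

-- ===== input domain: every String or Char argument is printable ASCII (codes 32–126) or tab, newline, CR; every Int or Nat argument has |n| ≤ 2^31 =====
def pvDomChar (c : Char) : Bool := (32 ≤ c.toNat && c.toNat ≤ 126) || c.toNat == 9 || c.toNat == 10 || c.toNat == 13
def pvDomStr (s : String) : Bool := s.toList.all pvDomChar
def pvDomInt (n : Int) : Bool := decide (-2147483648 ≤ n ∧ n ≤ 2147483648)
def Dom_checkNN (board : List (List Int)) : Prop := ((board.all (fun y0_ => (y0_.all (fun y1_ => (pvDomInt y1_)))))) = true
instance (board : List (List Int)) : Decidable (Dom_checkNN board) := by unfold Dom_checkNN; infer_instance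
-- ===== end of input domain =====

-- B flattens once, guards on the count, and compares sets instead of sorting; return-value equivalence is proved below.

-- ===== PORT A =====
def checkNN (board : List (List Int)) : Bool :=
  let n := board.length
  let lst := board.foldl (fun acc row => acc ++ row) []
  let lstSorted := PySem.List.sorted lst (fun x => x) false
  let nnLst := PySem.List.pyRange 1 ((n : Int) ^ 2 + 1) 1
  decide (nnLst = lstSorted)

-- ===== PORT B =====
def checkNN_alt (board : List (List Int)) : Bool :=
  let n := board.length
  let flat := board.flatMap (fun row => row)
  if flat.length ≠ n * n then false
  else PySem.Set.equal (PySem.Set.ofList flat)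
        (PySem.Set.ofList (PySem.List.pyRange 1 ((n : Int) * (n : Int) + 1) 1))

-- ===== PRECONDITION & SPEC =====
def Spec_checkNN (board : List (List Int)) (out : Bool) : Prop := out = checkNN_alt board
instance (board : List (List Int)) (out : Bool) : Decidable (Spec_checkNN board out) := by unfold Spec_checkNN; infer_instance

-- ===== CLAIM (what is proved, stated in full; the proofs are below) =====
def Claim_equal_checkNN : Prop := ∀ (board : List (List Int)), Dom_checkNN board → Spec_checkNN board (checkNN board)

-- ===== LEMMAS AND PROOFS =====

-- two lists with equal length and the same members, the second duplicate-free, are permutations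
theorem pv_perm_of_len_mem (xs ys : List Int) (hys : ys.Nodup) (hl : xs.length = ys.length)
    (hm : ∀ a, a ∈ xs ↔ a ∈ ys) : xs.Perm ys := by
  have hts : xs.toFinset = ys.toFinset := by ext a; simp [hm]
  have hcy : ys.toFinset.card = ys.length := List.toFinset_card_of_nodup hys
  have hcx : xs.toFinset.card = xs.length := by rw [hts, hcy, hl]
  have hnx : xs.Nodup := by
    have hd : xs.dedup.length = xs.length := by
      rw [← List.card_toFinset xs, hcx]
    have hs : xs.dedup.Sublist xs := List.dedup_sublist xs
    have : xs.dedup = xs := hs.eq_of_length hd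
    rw [← this]; exact List.nodup_dedup xs
  exact List.perm_of_nodup_nodup_toFinset_eq hnx hys hts

-- core: "sorted(flat) == range(1, m*m+1)"  ↔  "len(flat) == m*m and set(flat) == set(range(1, m*m+1))"
theorem pv_key (flat : List Int) (n : Nat) :
    (decide (PySem.List.pyRange 1 ((n : Int) ^ 2 + 1) 1 = PySem.List.sorted flat (fun x => x) false))
    = (if flat.length ≠ n * n then false
       else PySem.Set.equal (PySem.Set.ofList flat)
            (PySem.Set.ofList (PySem.List.pyRange 1 ((n : Int) * (n : Int) + 1) 1))) := by
  have hsq : ((n : Int) ^ 2 + 1) = ((n : Int) * (n : Int) + 1) := by ring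
  rw [hsq]
  set R := PySem.List.pyRange 1 ((n : Int) * (n : Int) + 1) 1 with hR
  have hRlen : R.length = n * n := by
    rw [hR, PySem.List.length_pyRange_one]
    have : ((n : Int) * (n : Int) + 1 - 1) = ((n * n : Nat) : Int) := by push_cast; ring
    rw [this, Int.toNat_natCast]
  by_cases hlen : flat.length = n * n
  · rw [if_neg (by simp [hlen])]
    have hiff : (R = PySem.List.sorted flat (fun x => x) false)
        ↔ (PySem.Set.equal (PySem.Set.ofList flat) (PySem.Set.ofList R) = true) := by
      rw [PySem.Set.equal_iff]
      constructor
      · intro h a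
        have hp : (PySem.List.sorted flat (fun x => x) false).Perm flat :=
          PySem.List.sorted_perm flat (fun x => x) false
        rw [← h] at hp
        simp only [PySem.Set.mem_ofList]
        exact (hp.mem_iff).symm
      · intro h
        have hm : ∀ a, a ∈ flat ↔ a ∈ R := by
          intro a
          have := h a
          simpa [PySem.Set.mem_ofList] using this
        have hperm : flat.Perm R :=
          pv_perm_of_len_mem flat R (PySem.List.nodup_pyRange_one _ _) (by rw [hlen, hRlen])
            hm
        exact (PySem.List.sorted_eq_of_perm_of_pairwise_lt flat R (fun x => x)
          hperm.symm (PySem.List.pairwise_lt_pyRange_one _ _)).symm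
    by_cases hq : R = PySem.List.sorted flat (fun x => x) false
    · rw [hiff.mp hq]; simp [hq]
    · have : ¬ (PySem.Set.equal (PySem.Set.ofList flat) (PySem.Set.ofList R) = true) :=
        fun h => hq (hiff.mpr h)
      simp [hq, this]
  · have hne : R ≠ PySem.List.sorted flat (fun x => x) false := by
      intro h
      apply hlen
      have := congrArg List.length h
      rw [hRlen, PySem.List.length_sorted] at this
      omega
    simp [hlen, hne]

-- ===== VERDICT (by name: the statement is the Claim_ definition above) =====
theorem checkNN_spec : Claim_equal_checkNN := by
  intro board _
  unfold Spec_checkNN checkNN checkNN_alt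
  have hflat : board.foldl (fun acc row => acc ++ row) [] = board.flatMap (fun row => row) := by
    simpa using PySem.List.foldl_append_eq_flatMap (fun r => r) board []
  rw [hflat]
  exact pv_key (board.flatMap (fun row => row)) board.length
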